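-- pv_equiv track=rewrite | github.com/AhmosGUC/fyyur | app.py | days_to_num
-- ===== SOURCE A (Python) =====
-- def days_to_num(lst):
--     days = 0
--     S = 1 << 6
--     Su = 1 << 5
--     M = 1 << 4
--     T = 1 << 3
--     W = 1 << 2
--     Th = 1 << 1
--     F = 1
--     for d in lst:
--         if d == "Saturday":
--             days = days | S
--         elif d == "Sunday":
--             days = days | Su
--         elif d == "Monday":
--             days = days | M
--         elif d == "Tuesday":
--             days = days | T
--         elif d == "Wednesday":
--             days = days | W
--         elif d == "Thursday":
--             days = days | Th
--         elif d == "Friday":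
--             days = days | F
--     return days
-- ===== SOURCE B (Python) =====
-- DAY_BITS = [
--     ("Saturday", 1 << 6),
--     ("Sunday", 1 << 5),
--     ("Monday", 1 << 4),
--     ("Tuesday", 1 << 3),
--     ("Wednesday", 1 << 2),
--     ("Thursday", 1 << 1),
--     ("Friday", 1),
-- ]
--
--
-- def days_to_num(lst):
--     days = 0
--     for name, bit in DAY_BITS:
--         if name in lst:
--             days |= bit
--     return days
-- ===== Notes on version B (the rewrite author's own statement) =====
-- stated objective: idiomatic
-- what changed: B iterates over a fixed table of the seven (day, bit) pairs and sets each bit via a membership test on the input, instead of A's per-element loop with a seven-way equality cascade.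
import Mathlib
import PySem

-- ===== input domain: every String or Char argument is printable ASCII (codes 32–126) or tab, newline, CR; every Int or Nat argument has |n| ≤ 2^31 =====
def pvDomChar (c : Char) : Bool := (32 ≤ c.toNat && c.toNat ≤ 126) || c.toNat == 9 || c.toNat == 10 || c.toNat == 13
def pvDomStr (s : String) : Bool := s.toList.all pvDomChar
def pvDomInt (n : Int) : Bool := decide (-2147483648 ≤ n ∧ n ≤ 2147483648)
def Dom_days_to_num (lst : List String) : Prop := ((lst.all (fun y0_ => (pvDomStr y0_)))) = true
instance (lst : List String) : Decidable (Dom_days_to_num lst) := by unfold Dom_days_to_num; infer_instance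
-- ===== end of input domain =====

-- B replaces A's per-element seven-way equality cascade by a loop over the fixed (day, bit) table with membership tests; same results, more idiomatic.


-- ===== PORT A =====
-- literal transliteration of A: loop over lst, seven-way equality chain, OR the matching bit into the accumulator
def days_to_num (lst : List String) : Int :=
  lst.foldl (fun days d =>
    if d = "Saturday" then PySem.Int.bor days (1 <<< 6)
    else if d = "Sunday" then PySem.Int.bor days (1 <<< 5)
    else if d = "Monday" then PySem.Int.bor days (1 <<< 4)
    else if d = "Tuesday" then PySem.Int.bor days (1 <<< 3)
    else if d = "Wednesday" then PySem.Int.bor days (1 <<< 2)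
    else if d = "Thursday" then PySem.Int.bor days (1 <<< 1)
    else if d = "Friday" then PySem.Int.bor days 1
    else days) 0

-- ===== PORT B =====
def DAY_BITS : List (String × Int) :=
  [("Saturday", 1 <<< 6), ("Sunday", 1 <<< 5), ("Monday", 1 <<< 4),
   ("Tuesday", 1 <<< 3), ("Wednesday", 1 <<< 2), ("Thursday", 1 <<< 1), ("Friday", 1)]

-- literal transliteration of B: loop over the fixed table, one membership test per day
def days_to_num_alt (lst : List String) : Int :=
  DAY_BITS.foldl (fun days p => if lst.contains p.1 then PySem.Int.bor days p.2 else days) 0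

-- ===== PRECONDITION & SPEC =====
def Spec_days_to_num (lst : List String) (out : Int) : Prop := out = days_to_num_alt lst
instance (lst : List String) (out : Int) : Decidable (Spec_days_to_num lst out) := by unfold Spec_days_to_num; infer_instance

-- ===== CLAIM (what is proved, stated in full; the proofs are below) =====
def Claim_equal_days_to_num : Prop := ∀ (lst : List String), Dom_days_to_num lst → Spec_days_to_num lst (days_to_num lst)

-- ===== LEMMAS AND PROOFS =====

-- the bit A's cascade ORs in for one element, at the Nat level
def bitN (d : String) : Nat :=
  if d = "Saturday" then 64
  else if d = "Sunday" then 32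
  else if d = "Monday" then 16
  else if d = "Tuesday" then 8
  else if d = "Wednesday" then 4
  else if d = "Thursday" then 2
  else if d = "Friday" then 1
  else 0

-- the common value, written as an OR of seven membership-conditioned bits
def maskN (lst : List String) : Nat :=
  (if lst.contains "Saturday" then 64 else 0) |||
  (if lst.contains "Sunday" then 32 else 0) |||
  (if lst.contains "Monday" then 16 else 0) |||
  (if lst.contains "Tuesday" then 8 else 0) |||
  (if lst.contains "Wednesday" then 4 else 0) |||
  (if lst.contains "Thursday" then 2 else 0) |||
  (if lst.contains "Friday" then 1 else 0)

theorem alt_eq_mask (lst : List String) : days_to_num_alt lst = (maskN lst : Int) := by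
  unfold days_to_num_alt DAY_BITS maskN
  simp only [List.foldl]
  split_ifs <;> decide

theorem step_eq (n : Nat) (d : String) :
    (if d = "Saturday" then PySem.Int.bor (n : Int) (1 <<< 6)
    else if d = "Sunday" then PySem.Int.bor (n : Int) (1 <<< 5)
    else if d = "Monday" then PySem.Int.bor (n : Int) (1 <<< 4)
    else if d = "Tuesday" then PySem.Int.bor (n : Int) (1 <<< 3)
    else if d = "Wednesday" then PySem.Int.bor (n : Int) (1 <<< 2)
    else if d = "Thursday" then PySem.Int.bor (n : Int) (1 <<< 1)
    else if d = "Friday" then PySem.Int.bor (n : Int) 1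
    else (n : Int)) = ((n ||| bitN d : Nat) : Int) := by
  unfold bitN
  split_ifs
  · rw [PySem.Int.bor_natCast]; rfl
  · rw [PySem.Int.bor_natCast]; rfl
  · rw [PySem.Int.bor_natCast]; rfl
  · rw [PySem.Int.bor_natCast]; rfl
  · rw [PySem.Int.bor_natCast]; rfl
  · rw [PySem.Int.bor_natCast]; rfl
  · rw [show ((1:Int)) = ((1:Nat):Int) by decide, PySem.Int.bor_natCast]
  · simp

theorem maskN_cons (d : String) (t : List String) :
    maskN (d :: t) = bitN d ||| maskN t := by
  by_cases h1 : d = "Saturday"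
  · subst h1; unfold maskN bitN; simp [List.mem_cons]; split_ifs <;> decide
  by_cases h2 : d = "Sunday"
  · subst h2; unfold maskN bitN; simp [List.mem_cons]; split_ifs <;> decide
  by_cases h3 : d = "Monday"
  · subst h3; unfold maskN bitN; simp [List.mem_cons]; split_ifs <;> decide
  by_cases h4 : d = "Tuesday"
  · subst h4; unfold maskN bitN; simp [List.mem_cons]; split_ifs <;> decide
  by_cases h5 : d = "Wednesday"
  · subst h5; unfold maskN bitN; simp [List.mem_cons]; split_ifs <;> decide
  by_cases h6 : d = "Thursday"
  · subst h6; unfold maskN bitN; simp [List.mem_cons]; split_ifs <;> decide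
  by_cases h7 : d = "Friday"
  · subst h7; unfold maskN bitN; simp [List.mem_cons]; split_ifs <;> decide
  · unfold maskN bitN
    simp [List.mem_cons, h1, h2, h3, h4, h5, h6, h7,
      Ne.symm h1, Ne.symm h2, Ne.symm h3, Ne.symm h4, Ne.symm h5, Ne.symm h6, Ne.symm h7]

theorem foldl_a (lst : List String) (n : Nat) :
    lst.foldl (fun days d =>
      if d = "Saturday" then PySem.Int.bor days (1 <<< 6)
      else if d = "Sunday" then PySem.Int.bor days (1 <<< 5)
      else if d = "Monday" then PySem.Int.bor days (1 <<< 4)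
      else if d = "Tuesday" then PySem.Int.bor days (1 <<< 3)
      else if d = "Wednesday" then PySem.Int.bor days (1 <<< 2)
      else if d = "Thursday" then PySem.Int.bor days (1 <<< 1)
      else if d = "Friday" then PySem.Int.bor days 1
      else days) (n : Int) = ((n ||| maskN lst : Nat) : Int) := by
  induction lst generalizing n with
  | nil => simp [maskN]
  | cons d t ih =>
      simp only [List.foldl, step_eq, ih, maskN_cons, Nat.or_assoc]

-- ===== VERDICT (by name: the statement is the Claim_ definition above) =====
theorem days_to_num_spec : Claim_equal_days_to_num := by
  intro lst _
  unfold Spec_days_to_num days_to_num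
  rw [show (0:Int) = ((0:Nat):Int) from rfl, foldl_a, alt_eq_mask]
  simp
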